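-- pv_equiv track=rewrite | github.com/roycehoe/parliament-parser | tagging/section.py | get_section_tagged_handsard
-- ===== SOURCE A (Python) =====
-- from enum import StrEnum, auto
-- from typing import Iterable
--
-- class Section(StrEnum):
--     META = auto()
--     ATTENDANCE = auto()
--     TRANSCRIPT = auto()
--     ANNEX = auto()
--
-- def is_start_of_attendance(text: str) -> bool:
--     return "PRESENT:" in text
--
-- def is_start_of_transcript(text: str) -> bool:
--     return (
--         "ORAL ANSWER TO QUESTION" in text
--         or "ORAL ANSWERS TO QUESTIONS" in text
--         or "[MR SPEAKER IN THE CHAIR]" in text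
--         or "[Mr Speaker in the Chair]" in text
--         or "PRESIDENT'S ADDRESS" in text
--     )
--
-- def is_start_of_annex(text: str) -> bool:
--     return "Adjourned accordingly at" in text
--
-- def get_section_tagged_lines(
--     lines: list[str],
-- ) -> Iterable[tuple[str, Section]]:
--     section_tags: list[Section] = []
--
--     current_section = Section.META
--     for line in lines:
--         if is_start_of_attendance(line):
--             current_section = Section.ATTENDANCE
--         if is_start_of_transcript(line):
--             current_section = Section.TRANSCRIPT
--         if is_start_of_annex(line):
--             current_section = Section.ANNEX
--         section_tags.append(current_section)
--
--     return zip(lines, section_tags)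
--
-- def get_section_tagged_handsard(handsard_lines_data: list[dict]):
--     result = []
--     section_tagged_handsard = get_section_tagged_lines(
--         [handsard_line_data["text"] for handsard_line_data in handsard_lines_data]
--     )
--     for index, (_, section) in enumerate(section_tagged_handsard):
--         result.append({**handsard_lines_data[index], "section": section})
--     return result
-- ===== SOURCE B (Python) =====
-- def _resolve(t):
--     # highest priority first: a later `if` in the original overrides earlier ones
--     if "Adjourned accordingly at" in t:
--         return "annex"
--     if ("ORAL ANSWER TO QUESTION" in t
--             or "ORAL ANSWERS TO QUESTIONS" in t
--             or "[MR SPEAKER IN THE CHAIR]" in t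
--             or "[Mr Speaker in the Chair]" in t
--             or "PRESIDENT'S ADDRESS" in t):
--         return "transcript"
--     if "PRESENT:" in t:
--         return "attendance"
--     return None
--
-- def get_section_tagged_handsard(handsard_lines_data):
--     texts = [d["text"] for d in handsard_lines_data]
--     # pass 1: record only the boundary points where the section changes
--     markers = []
--     for i, t in enumerate(texts):
--         s = _resolve(t)
--         if s is not None:
--             markers.append((i, s))
--     # pass 2: fill whole segments between consecutive markers
--     sections = []
--     prev, pos = "meta", 0
--     for i, s in markers:
--         sections += [prev] * (i - pos)
--         prev, pos = s, i
--     sections += [prev] * (len(texts) - pos)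
--     return [{**d, "section": s} for d, s in zip(handsard_lines_data, sections)]
-- ===== Notes on version B (the rewrite author's own statement) =====
-- stated objective: alternative
-- what changed: Replaces the per-line running-state scan with a two-pass boundary-segment algorithm: pass 1 records only the (index, section) points where a marker line changes the section (priority annex > transcript > attendance), pass 2 fills each inter-marker segment by replication, then merges the sections into the dicts.
import Mathlib
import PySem

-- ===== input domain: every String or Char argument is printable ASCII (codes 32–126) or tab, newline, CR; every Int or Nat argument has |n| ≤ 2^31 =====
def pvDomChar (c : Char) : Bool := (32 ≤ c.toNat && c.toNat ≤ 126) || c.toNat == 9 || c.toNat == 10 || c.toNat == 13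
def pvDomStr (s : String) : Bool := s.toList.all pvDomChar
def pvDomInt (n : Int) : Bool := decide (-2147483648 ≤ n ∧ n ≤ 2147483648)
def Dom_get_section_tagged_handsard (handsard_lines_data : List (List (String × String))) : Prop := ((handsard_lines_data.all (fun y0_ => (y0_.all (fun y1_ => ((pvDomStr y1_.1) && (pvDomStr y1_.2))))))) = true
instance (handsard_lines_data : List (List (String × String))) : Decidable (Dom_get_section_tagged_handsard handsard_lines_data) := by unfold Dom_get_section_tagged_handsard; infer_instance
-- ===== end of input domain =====

-- B replaces A's per-line running-state scan by a two-pass boundary-marker algorithm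
-- (record section-change points, then fill each segment by replication); same cost, different decomposition.


-- ===== PORT A =====
def pvIsAttendance (text : String) : Bool := PySem.Str.isIn "PRESENT:" text

def pvIsTranscript (text : String) : Bool :=
  PySem.Str.isIn "ORAL ANSWER TO QUESTION" text ||
  PySem.Str.isIn "ORAL ANSWERS TO QUESTIONS" text ||
  PySem.Str.isIn "[MR SPEAKER IN THE CHAIR]" text ||
  PySem.Str.isIn "[Mr Speaker in the Chair]" text ||
  PySem.Str.isIn "PRESIDENT'S ADDRESS" text

def pvIsAnnex (text : String) : Bool := PySem.Str.isIn "Adjourned accordingly at" text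

-- get_section_tagged_lines: running current_section, three plain ifs, append tag per line, zip
def pvTaggedLines (lines : List String) : List (String × String) :=
  let st := lines.foldl (fun (st : String × List String) line =>
    let cur := st.1
    let cur := if pvIsAttendance line then "attendance" else cur
    let cur := if pvIsTranscript line then "transcript" else cur
    let cur := if pvIsAnnex line then "annex" else cur
    (cur, st.2 ++ [cur])) ("meta", [])
  lines.zip st.2

-- d["text"] raises KeyError when absent: the .getD "" default is only reached outside Pre_
def get_section_tagged_handsard (handsard_lines_data : List (List (String × String))) : List (List (String × String)) :=
  let tagged := pvTaggedLines (handsard_lines_data.map (fun d => ((PySem.Dict.mk d).get? "text").getD ""))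
  (PySem.List.enumerate tagged).foldl (fun res p =>
    res ++ [((PySem.Dict.mk ((PySem.List.pyGet? handsard_lines_data p.1).getD [])).insert "section" p.2.2).items]) []

-- ===== PORT B =====
def pvResolve (t : String) : Option String :=
  if PySem.Str.isIn "Adjourned accordingly at" t then some "annex"
  else if (PySem.Str.isIn "ORAL ANSWER TO QUESTION" t ||
           PySem.Str.isIn "ORAL ANSWERS TO QUESTIONS" t ||
           PySem.Str.isIn "[MR SPEAKER IN THE CHAIR]" t ||
           PySem.Str.isIn "[Mr Speaker in the Chair]" t ||
           PySem.Str.isIn "PRESIDENT'S ADDRESS" t) then some "transcript"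
  else if PySem.Str.isIn "PRESENT:" t then some "attendance"
  else none

-- pass 1: the boundary points (index, section) where the section changes
def pvMarkers : List String → Nat → List (Nat × String)
  | [], _ => []
  | t :: ts, i =>
    match pvResolve t with
    | some s => (i, s) :: pvMarkers ts (i + 1)
    | none => pvMarkers ts (i + 1)

-- pass 2: fill each inter-marker segment by replication
def pvFill (n : Nat) : String → Nat → List (Nat × String) → List String
  | prev, pos, [] => List.replicate (n - pos) prev
  | prev, pos, (i, s) :: ms => List.replicate (i - pos) prev ++ pvFill n s i ms

def get_section_tagged_handsard_alt (handsard_lines_data : List (List (String × String))) : List (List (String × String)) :=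
  let texts := handsard_lines_data.map (fun d => ((PySem.Dict.mk d).get? "text").getD "")
  let sections := pvFill texts.length "meta" 0 (pvMarkers texts 0)
  (handsard_lines_data.zip sections).map (fun p => ((PySem.Dict.mk p.1).insert "section" p.2).items)

-- ===== PRECONDITION & SPEC =====
-- Pre_ excludes exactly the inputs on which Python A raises KeyError: a line dict without a "text" key.
def Pre_get_section_tagged_handsard (handsard_lines_data : List (List (String × String))) : Prop :=
  handsard_lines_data.all (fun d => (PySem.Dict.mk d).contains "text") = true
instance (handsard_lines_data : List (List (String × String))) : Decidable (Pre_get_section_tagged_handsard handsard_lines_data) := by unfold Pre_get_section_tagged_handsard; infer_instance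

def pvWitness_get_section_tagged_handsard : (List (List (String × String))) :=
  [[("text", "PRESENT: members")], [("text", "a line")]]

def Spec_get_section_tagged_handsard (handsard_lines_data : List (List (String × String))) (out : List (List (String × String))) : Prop := out = get_section_tagged_handsard_alt handsard_lines_data
instance (handsard_lines_data : List (List (String × String))) (out : List (List (String × String))) : Decidable (Spec_get_section_tagged_handsard handsard_lines_data out) := by unfold Spec_get_section_tagged_handsard; infer_instance

-- ===== CLAIM (what is proved, stated in full; the proofs are below) =====
def Claim_equal_get_section_tagged_handsard : Prop := ∀ (handsard_lines_data : List (List (String × String))), Dom_get_section_tagged_handsard handsard_lines_data → Pre_get_section_tagged_handsard handsard_lines_data → Spec_get_section_tagged_handsard handsard_lines_data (get_section_tagged_handsard handsard_lines_data)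

-- ===== LEMMAS AND PROOFS =====

-- reference scan both ports are reduced to: the tag of each line under a running current section
def pvScan : String → List String → List String
  | _, [] => []
  | cur, t :: ts => (pvResolve t).getD cur :: pvScan ((pvResolve t).getD cur) ts

-- A's three-if cascade computes exactly pvResolve's priority
theorem pv_step_eq (cur t : String) :
    (if pvIsAnnex t then "annex"
     else if pvIsTranscript t then "transcript"
     else if pvIsAttendance t then "attendance" else cur) = (pvResolve t).getD cur := by
  unfold pvIsAnnex pvIsTranscript pvIsAttendance pvResolve
  split_ifs <;> simp_all

-- A's inner foldl produces acc ++ the scan tags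
theorem pv_foldl_scan (lines : List String) (cur : String) (acc : List String) :
    (lines.foldl (fun (st : String × List String) line =>
      let c := st.1
      let c := if pvIsAttendance line then "attendance" else c
      let c := if pvIsTranscript line then "transcript" else c
      let c := if pvIsAnnex line then "annex" else c
      (c, st.2 ++ [c])) (cur, acc)).2 = acc ++ pvScan cur lines := by
  induction lines generalizing cur acc with
  | nil => simp [pvScan]
  | cons t ts ih =>
    simp only [List.foldl_cons, pvScan]
    have hstep := pv_step_eq cur t
    by_cases h1 : pvIsAnnex t <;> by_cases h2 : pvIsTranscript t <;> by_cases h3 : pvIsAttendance t <;>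
      simp only [h1, h2, h3, if_true] at hstep ⊢ <;> rw [← hstep] <;> simp [ih]

-- every marker index produced from start i is ≥ i
theorem pv_markers_ge (ts : List String) (i : Nat) :
    ∀ p ∈ pvMarkers ts i, i ≤ p.1 := by
  induction ts generalizing i with
  | nil => simp [pvMarkers]
  | cons t ts ih =>
    intro p hp
    unfold pvMarkers at hp
    cases h : pvResolve t with
    | some s =>
      rw [h] at hp
      rcases List.mem_cons.mp hp with rfl | hp
      · exact le_refl _
      · exact le_trans (Nat.le_succ i) (ih (i + 1) p hp)
    | none =>
      rw [h] at hp
      exact le_trans (Nat.le_succ i) (ih (i + 1) p hp)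

-- peeling one position off a fill whose markers all lie strictly later
theorem pv_fill_cons (ms : List (Nat × String)) (n : Nat) (prev : String) (pos : Nat)
    (hms : ∀ p ∈ ms, pos + 1 ≤ p.1) (hn : pos < n) :
    pvFill n prev pos ms = prev :: pvFill n prev (pos + 1) ms := by
  cases ms with
  | nil =>
    simp only [pvFill]
    have : n - pos = (n - (pos + 1)) + 1 := by omega
    rw [this, List.replicate_succ]
  | cons p ms =>
    obtain ⟨i, s⟩ := p
    have hi : pos + 1 ≤ i := hms (i, s) (by simp)
    simp only [pvFill]
    have : i - pos = (i - (pos + 1)) + 1 := by omega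
    rw [this, List.replicate_succ, List.cons_append]

-- the filled segments equal the reference scan
theorem pv_fill_markers (ts : List String) (prev : String) (pos : Nat) :
    pvFill (pos + ts.length) prev pos (pvMarkers ts pos) = pvScan prev ts := by
  induction ts generalizing prev pos with
  | nil => simp [pvMarkers, pvFill, pvScan]
  | cons t ts ih =>
    simp only [pvMarkers, pvScan, List.length_cons]
    cases h : pvResolve t with
    | some s =>
      simp only [pvFill, Nat.sub_self, List.replicate_zero, List.nil_append, Option.getD_some]
      rw [pv_fill_cons _ _ _ _ (pv_markers_ge ts (pos + 1)) (by omega)]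
      have : pos + (ts.length + 1) = (pos + 1) + ts.length := by omega
      rw [this, ih s (pos + 1)]
    | none =>
      simp only [Option.getD_none]
      rw [pv_fill_cons _ _ _ _ (pv_markers_ge ts (pos + 1)) (by omega)]
      have : pos + (ts.length + 1) = (pos + 1) + ts.length := by omega
      rw [this, ih prev (pos + 1)]

-- A's enumerate-and-reindex loop equals B's direct zip-map, for any per-element merge G
theorem pv_enum_zip (G : List (String × String) → String → List (String × String))
    (f : List (String × String) → String)
    (full : List (List (String × String))) :
    ∀ (rest : List (List (String × String))) (tags : List String) (k : Nat),
    rest = full.drop k →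
    (PySem.List.enumerate ((rest.map f).zip tags) (k : Int)).map
      (fun p => G ((PySem.List.pyGet? full p.1).getD []) p.2.2)
    = (rest.zip tags).map (fun p => G p.1 p.2) := by
  intro rest
  induction rest with
  | nil => intro tags k _; simp [PySem.List.enumerate_nil]
  | cons d rest ih =>
    intro tags k hk
    cases tags with
    | nil => simp [PySem.List.enumerate_nil]
    | cons s tags =>
      simp only [List.map_cons, List.zip_cons_cons, PySem.List.enumerate_cons, List.map]
      congr 1
      · have hget : full[k]? = some d := by
          have : (full.drop k)[0]? = some d := by rw [← hk]; rfl
          simpa using this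
        rw [PySem.List.pyGet?_natCast, hget]; rfl
      · have hrest : rest = full.drop (k + 1) := by
          have := congrArg List.tail hk
          simpa [List.tail_drop] using this
        have := ih tags (k + 1) hrest
        rw [← this]
        norm_cast

-- ===== VERDICT (by name: the statement is the Claim_ definition above) =====
theorem get_section_tagged_handsard_spec : Claim_equal_get_section_tagged_handsard := by
  intro data _ _
  unfold Spec_get_section_tagged_handsard
  simp only [get_section_tagged_handsard, get_section_tagged_handsard_alt, pvTaggedLines]
  rw [PySem.List.foldl_append_singleton_eq_map]
  rw [pv_foldl_scan]
  rw [List.nil_append]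
  have hfill := pv_fill_markers (data.map (fun d => ((PySem.Dict.mk d).get? "text").getD "")) "meta" 0
  rw [Nat.zero_add] at hfill
  rw [hfill]
  have := pv_enum_zip (fun d s => ((PySem.Dict.mk d).insert "section" s).items)
    (fun d => ((PySem.Dict.mk d).get? "text").getD "") data data
    (pvScan "meta" (data.map (fun d => ((PySem.Dict.mk d).get? "text").getD ""))) 0 (by simp)
  simpa using this
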